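-- pv_equiv track=rewrite | github.com/thegrenadinekid25/neume-ml | src/data_generation/voicing/voice_distribution.py | _verify_voicing
-- ===== SOURCE A (Python) =====
-- from typing import List, Tuple, Optional
--
-- MIN_SPACING = 2
--
-- def _verify_voicing(
--     voicing: List[int],
--     voice_ranges: List[Tuple[int, int]],
-- ) -> bool:
--     """
--     Verify that a voicing satisfies all constraints.
--
--     Args:
--         voicing: List of MIDI notes, one per voice
--         voice_ranges: List of (low, high) ranges for each voice
--
--     Returns:
--         True if all constraints are satisfied, False otherwise.
--     """
--     # Check: All notes are unique
--     if len(set(voicing)) != len(voicing):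
--         return False
--
--     # Check: Notes are in ascending order
--     if voicing != sorted(voicing):
--         return False
--
--     # Check: Each note is in its voice range
--     for voice_idx, note in enumerate(voicing):
--         voice_low, voice_high = voice_ranges[voice_idx]
--         if not (voice_low <= note <= voice_high):
--             return False
--
--     # Check: Minimum spacing between adjacent voices
--     for i in range(len(voicing) - 1):
--         if voicing[i + 1] - voicing[i] < MIN_SPACING:
--             return False
--
--     return True
-- ===== SOURCE B (Python) =====
-- from typing import List, Tuple
--
-- MIN_SPACING = 2
--
-- def _verify_voicing(
--     voicing: List[int],
--     voice_ranges: List[Tuple[int, int]],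
-- ) -> bool:
--     # Two linear zip passes: a note is accepted iff it lies in its paired
--     # range, and each adjacent pair is at least MIN_SPACING apart (which
--     # already implies strictly ascending, hence sorted and unique).
--     return (all(lo <= n <= hi for n, (lo, hi) in zip(voicing, voice_ranges))
--             and all(b - a >= MIN_SPACING for a, b in zip(voicing, voicing[1:])))
-- ===== Notes on version B (the rewrite author's own statement) =====
-- stated objective: faster
-- what changed: The four sequential checks (set-based uniqueness, sort-and-compare ascending test, index-based range loop, index-based spacing loop) collapse into two linear zip passes: note-in-paired-range and adjacent-gap >= MIN_SPACING, the latter subsuming both uniqueness and sortedness, with no sort, no set and no indexing.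
import Mathlib
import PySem

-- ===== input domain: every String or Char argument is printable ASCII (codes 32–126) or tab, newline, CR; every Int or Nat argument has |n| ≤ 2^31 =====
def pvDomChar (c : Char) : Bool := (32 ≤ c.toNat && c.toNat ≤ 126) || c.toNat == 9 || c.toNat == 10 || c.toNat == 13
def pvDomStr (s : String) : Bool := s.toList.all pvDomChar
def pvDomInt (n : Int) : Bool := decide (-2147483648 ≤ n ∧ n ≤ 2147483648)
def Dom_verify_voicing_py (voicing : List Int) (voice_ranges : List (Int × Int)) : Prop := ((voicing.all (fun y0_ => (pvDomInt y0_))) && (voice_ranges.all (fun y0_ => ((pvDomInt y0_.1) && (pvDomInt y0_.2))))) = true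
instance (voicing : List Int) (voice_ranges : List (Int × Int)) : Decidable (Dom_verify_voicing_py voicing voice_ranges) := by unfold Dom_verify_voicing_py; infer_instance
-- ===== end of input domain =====

-- B replaces A's four checks (set uniqueness, sort-and-compare, indexed range loop,
-- indexed spacing loop) by two linear zip passes: no sort, no set, no indexing
-- (measurably faster in a timing run; O(n) instead of O(n log n)).

-- ===== PORT A =====
-- 'for voice_idx, note in enumerate(voicing): low, high = voice_ranges[voice_idx]; if not (low <= note <= high): return False'
def pvA_rangeLoop (rs : List (Int × Int)) : List (Int × Int) → Bool
  | [] => true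
  | (i, note) :: rest =>
    match PySem.List.pyGet? rs i with
    | none => false   -- IndexError: excluded by Pre_verify_voicing_py
    | some (lo, hi) => if ¬ (lo ≤ note ∧ note ≤ hi) then false else pvA_rangeLoop rs rest

-- 'for i in range(len(voicing) - 1): if voicing[i+1] - voicing[i] < MIN_SPACING: return False'
def pvA_spacingLoop (v : List Int) : List Int → Bool
  | [] => true
  | i :: rest =>
    match PySem.List.pyGet? v (i + 1), PySem.List.pyGet? v i with
    | some b, some a => if b - a < 2 then false else pvA_spacingLoop v rest
    | _, _ => false   -- unreachable: range(len(voicing)-1) indices are valid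

def verify_voicing_py (voicing : List Int) (voice_ranges : List (Int × Int)) : Bool :=
  if (PySem.Set.ofList voicing).length ≠ voicing.length then false
  else if voicing ≠ PySem.List.sorted voicing (fun x => x) false then false
  else if pvA_rangeLoop voice_ranges (PySem.List.enumerate voicing) = false then false
  else pvA_spacingLoop voicing (PySem.List.pyRange 0 ((voicing.length : Int) - 1) 1)

-- ===== PORT B =====
def verify_voicing_py_alt (voicing : List Int) (voice_ranges : List (Int × Int)) : Bool :=
  ((voicing.zip voice_ranges).all (fun p => decide (p.2.1 ≤ p.1 ∧ p.1 ≤ p.2.2))) &&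
  ((voicing.zip (voicing.drop 1)).all (fun p => decide (2 ≤ p.2 - p.1)))

-- ===== PRECONDITION & SPEC =====
-- Pre_ excludes exactly the inputs on which A raises IndexError: a strictly increasing
-- voicing longer than voice_ranges whose first len(voice_ranges) notes are all in range.
def Pre_verify_voicing_py (voicing : List Int) (voice_ranges : List (Int × Int)) : Prop :=
  ¬ (voicing.IsChain (· < ·) ∧ voice_ranges.length < voicing.length ∧
      ∀ p ∈ voicing.zip voice_ranges, p.2.1 ≤ p.1 ∧ p.1 ≤ p.2.2)
instance (voicing : List Int) (voice_ranges : List (Int × Int)) : Decidable (Pre_verify_voicing_py voicing voice_ranges) := by unfold Pre_verify_voicing_py; infer_instance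
def pvWitness_verify_voicing_py : List Int × (List (Int × Int)) := ([60, 64], [(50, 70), (60, 80)])

def Spec_verify_voicing_py (voicing : List Int) (voice_ranges : List (Int × Int)) (out : Bool) : Prop := out = verify_voicing_py_alt voicing voice_ranges
instance (voicing : List Int) (voice_ranges : List (Int × Int)) (out : Bool) : Decidable (Spec_verify_voicing_py voicing voice_ranges out) := by unfold Spec_verify_voicing_py; infer_instance

-- ===== CLAIM (what is proved, stated in full; the proofs are below) =====
def Claim_equal_verify_voicing_py : Prop := ∀ (voicing : List Int) (voice_ranges : List (Int × Int)), Dom_verify_voicing_py voicing voice_ranges → Pre_verify_voicing_py voicing voice_ranges → Spec_verify_voicing_py voicing voice_ranges (verify_voicing_py voicing voice_ranges)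

-- ===== LEMMAS AND PROOFS =====

-- B's spacing pass is the chain of the gap relation
theorem pvB_spacing_iff (v : List Int) :
    ((v.zip (v.drop 1)).all (fun p => decide (2 ≤ p.2 - p.1))) = true ↔
      v.IsChain (fun a b => 2 ≤ b - a) := by
  induction v with
  | nil => simp
  | cons a t ih =>
    cases t with
    | nil => simp
    | cons b u => simp_all [List.isChain_cons_cons]

-- set(v) keeps v itself when v has no duplicates
theorem pvFoldl_add_nodup : ∀ (xs acc : List Int), xs.Nodup → (∀ x ∈ xs, x ∉ acc) →
    xs.foldl PySem.Set.add acc = acc ++ xs := by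
  intro xs
  induction xs with
  | nil => simp
  | cons x t ih =>
    intro acc hn hd
    have hx : PySem.Set.add acc x = acc ++ [x] := by
      simp [PySem.Set.add]
      intro hc
      exact absurd hc (hd x (by simp))
    simp only [List.foldl_cons, hx]
    rw [ih (acc ++ [x]) hn.of_cons]
    · simp
    · intro y hy
      simp only [List.mem_append, List.mem_singleton]
      rintro (h1 | rfl)
      · exact hd y (by simp [hy]) h1
      · exact (List.nodup_cons.mp hn).1 hy

theorem pvOfList_eq_self (v : List Int) (h : v.Nodup) : PySem.Set.ofList v = v := by
  have := pvFoldl_add_nodup v [] h (by simp)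
  simpa [PySem.Set.ofList_eq_foldl, PySem.Set.empty] using this

-- len(set(v)) == len(v) forces v to have no duplicates
theorem pvNodup_of_ofList_length (v : List Int)
    (h : (PySem.Set.ofList v).length = v.length) : v.Nodup := by
  have h1 : (PySem.Set.ofList v).toFinset = v.toFinset := by
    ext x; simp [PySem.Set.mem_ofList]
  have h2 : v.toFinset.card = v.length := by
    rw [← h1, List.toFinset_card_of_nodup (PySem.Set.nodup_ofList v), h]
  rw [List.card_toFinset] at h2
  have h3 : v.dedup = v := (List.dedup_sublist v).eq_of_length h2
  rw [← h3]; exact v.nodup_dedup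

-- A's range loop, started at index k, is B's zip pass over the drops
theorem pvA_rangeLoop_eq (rs : List (Int × Int)) : ∀ (v : List Int) (k : Nat),
    k + v.length ≤ rs.length →
    pvA_rangeLoop rs (PySem.List.enumerate v (k : Int)) =
      ((v.zip (rs.drop k)).all (fun p => decide (p.2.1 ≤ p.1 ∧ p.1 ≤ p.2.2))) := by
  intro v
  induction v with
  | nil => intro k h; simp [PySem.List.enumerate_nil, pvA_rangeLoop]
  | cons n t ih =>
    intro k h
    have hk : k < rs.length := by simp at h; omega
    rw [PySem.List.enumerate_cons, List.drop_eq_getElem_cons hk]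
    rcases hrs : rs[k] with ⟨lo, hi⟩
    simp only [pvA_rangeLoop, PySem.List.pyGet?_natCast, List.getElem?_eq_getElem hk, hrs,
      List.zip_cons_cons, List.all_cons]
    have hc : (k : Int) + 1 = ((k+1 : Nat) : Int) := by push_cast; ring
    rw [hc, ih (k+1) (by simp at h ⊢; omega)]
    by_cases hq : lo ≤ n ∧ n ≤ hi
    · rw [if_neg (not_not_intro hq)]
      simp [hq]
    · rw [if_pos hq]
      simp [hq]

-- when B's zip pass fails, A's range loop also returns False (no length bound needed)
theorem pvA_rangeLoop_false (rs : List (Int × Int)) : ∀ (v : List Int) (k : Nat),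
    ((v.zip (rs.drop k)).all (fun p => decide (p.2.1 ≤ p.1 ∧ p.1 ≤ p.2.2))) = false →
    pvA_rangeLoop rs (PySem.List.enumerate v (k : Int)) = false := by
  intro v
  induction v with
  | nil => intro k h; simp at h
  | cons n t ih =>
    intro k h
    by_cases hk : k < rs.length
    · rw [List.drop_eq_getElem_cons hk] at h
      rw [PySem.List.enumerate_cons]
      rcases hrs : rs[k] with ⟨lo, hi⟩
      rw [hrs, List.zip_cons_cons, List.all_cons] at h
      simp only [pvA_rangeLoop, PySem.List.pyGet?_natCast, List.getElem?_eq_getElem hk, hrs]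
      by_cases hq : lo ≤ n ∧ n ≤ hi
      · have hc : (k : Int) + 1 = ((k+1 : Nat) : Int) := by push_cast; ring
        rw [hc, if_neg (not_not_intro hq)]
        simp only [hq] at h
        exact ih (k+1) h
      · rw [if_pos hq]
    · exfalso
      rw [List.drop_eq_nil_of_le (by omega)] at h
      simp at h
-- A's spacing loop over range(k, len-1) is B's zip pass over the drops
theorem pvA_spacingLoop_eq (v : List Int) : ∀ (n k : Nat), v.length ≤ k + n + 1 →
    pvA_spacingLoop v (PySem.List.pyRange (k : Int) ((v.length : Int) - 1) 1) =
      (((v.drop k).zip (v.drop (k + 1))).all (fun p => decide (2 ≤ p.2 - p.1))) := by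
  intro n
  induction n with
  | zero =>
    intro k h
    rw [PySem.List.pyRange_one_eq_nil (by omega),
        List.drop_eq_nil_of_le (show v.length ≤ k + 1 by omega)]
    simp [pvA_spacingLoop]
  | succ n ih =>
    intro k h
    by_cases hlt : k + 1 < v.length
    · have hk : k < v.length := by omega
      rw [PySem.List.pyRange_one_cons (by omega)]
      have e1 : (k : Int) + 1 = ((k+1 : Nat) : Int) := by push_cast; ring
      simp only [pvA_spacingLoop, e1, PySem.List.pyGet?_natCast,
        List.getElem?_eq_getElem hk, List.getElem?_eq_getElem hlt]
      rw [List.drop_eq_getElem_cons hk, List.drop_eq_getElem_cons hlt,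
        List.zip_cons_cons, List.all_cons]
      rw [ih (k+1) (by omega)]
      by_cases hq : v[k+1] - v[k] < 2
      · rw [if_pos hq]; simp; omega
      · rw [if_neg hq]
        have h2 : (2 : Int) ≤ v[k+1] - v[k] := by omega
        simp [h2]
    · rw [PySem.List.pyRange_one_eq_nil (by omega),
          List.drop_eq_nil_of_le (show v.length ≤ k + 1 by omega)]
      simp [pvA_spacingLoop]

-- ===== VERDICT (by name: the statement is the Claim_ definition above) =====
theorem verify_voicing_py_spec : Claim_equal_verify_voicing_py := by
  intro v rs _ hpre
  unfold Spec_verify_voicing_py verify_voicing_py verify_voicing_py_alt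
  by_cases hc : v.IsChain (· < ·)
  · -- v strictly increasing: the first two checks pass
    have hpw : v.Pairwise (· < ·) := List.isChain_iff_pairwise.mp hc
    have hnd : v.Nodup := hpw.imp (fun hab => by omega)
    have hle : v.Pairwise (fun a b => a ≤ b) := hpw.imp le_of_lt
    rw [pvOfList_eq_self v hnd, if_neg (by simp),
        PySem.List.sorted_eq_self_of_pairwise v (fun x => x) hle, if_neg (by simp)]
    have espc : pvA_spacingLoop v (PySem.List.pyRange 0 ((v.length : Int) - 1) 1) =
        ((v.zip (v.drop 1)).all (fun p => decide (2 ≤ p.2 - p.1))) := by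
      have h := pvA_spacingLoop_eq v v.length 0 (by omega)
      simpa using h
    by_cases hlen : v.length ≤ rs.length
    · have hrg := pvA_rangeLoop_eq rs v 0 (by omega)
      simp only [Nat.cast_zero, List.drop_zero] at hrg
      simp only [hrg, espc]
      cases hX : ((v.zip rs).all (fun p => decide (p.2.1 ≤ p.1 ∧ p.1 ≤ p.2.2))) <;> simp
    · -- len(voicing) > len(voice_ranges): Pre_ forces a zip failure, both sides False
      have hfail : ¬ ∀ p ∈ v.zip rs, p.2.1 ≤ p.1 ∧ p.1 ≤ p.2.2 := by
        intro hz
        exact hpre ⟨hc, by omega, hz⟩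
      have hall : ((v.zip rs).all (fun p => decide (p.2.1 ≤ p.1 ∧ p.1 ≤ p.2.2))) = false := by
        rw [Bool.eq_false_iff]
        intro ht
        exact hfail (by simpa using ht)
      have hrl := pvA_rangeLoop_false rs v 0 (by simpa using hall)
      simp only [Nat.cast_zero] at hrl
      rw [if_pos hrl, hall]
      simp
  · -- not strictly increasing: A fails a uniqueness/order check, B fails the spacing pass
    have hB : ((v.zip (v.drop 1)).all (fun p => decide (2 ≤ p.2 - p.1))) = false := by
      rw [Bool.eq_false_iff]
      intro ht
      exact hc (((pvB_spacing_iff v).mp ht).imp (fun hab => by omega))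
    rw [hB, Bool.and_false]
    by_cases h1 : (PySem.Set.ofList v).length ≠ v.length
    · rw [if_pos h1]
    · rw [if_neg h1]
      push Not at h1
      have hnd := pvNodup_of_ofList_length v h1
      by_cases h2 : v ≠ PySem.List.sorted v (fun x => x) false
      · rw [if_pos h2]
      · exfalso
        push Not at h2
        have hle : v.Pairwise (fun a b => a ≤ b) := by
          rw [h2]; exact PySem.List.sorted_pairwise v (fun x => x)
        have : v.Pairwise (· < ·) :=
          (hle.and hnd).imp (fun hab => lt_of_le_of_ne hab.1 hab.2)
        exact hc (List.isChain_iff_pairwise.mpr this)
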